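-- pv_equiv track=rewrite | github.com/HeoSeokYong/BoostCampAlgorithmStudy_LEVEL2_CV11 | week5/Wed/seunghyun_binary.py | solution
-- ===== SOURCE A (Python) =====
-- def solution(n, times):
--     answer = 0
--     start = 1
--     end = min(times)*n
--
--     while start <= end:
--         mid = (start + end) // 2 # 모든 사람이 심사를 받는데 걸리는 시간
--
--         result = 0
--
--         for t in times:
--             result += (mid // t) # 각 심사관이 심사할 수 있는 사람 수
--
--         if result >= n: # 조건에 만족하면 answer 업데이트
--             answer = mid
--             end = mid-1 # 현재보다 최소 시간이 존재하는 확인을 위해 end 업데이트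
--         else:
--             start = mid + 1
--     return answer
-- ===== SOURCE B (Python) =====
-- def solution(n, times):
--     m = min(times)
--     if n < 1 or m < 1:
--         return 0  # nobody to judge, or a non-positive processing time: no positive finish time
--     # largest T with sum(T / t) < n, computed exactly over the common denominator prod(times):
--     # it is a lower bound for the answer, at most len(times) completion events below it
--     den = 1
--     for t in times:
--         den *= t
--     num = sum(den // t for t in times)
--     cur = (n * den - 1) // num
--     c = sum(cur // t for t in times)
--     while c < n:
--         cur = min(t * (cur // t + 1) for t in times)  # next completion event after cur
--         c = sum(cur // t for t in times)
--     return cur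
-- ===== Notes on version B (the rewrite author's own statement) =====
-- stated objective: alternative
-- what changed: Replaces A's [start,end] interval bisection of the time axis by a direct computation: an exact rational lower bound (the largest T with sum(T/t) < n, over the common denominator prod(times)) followed by an event sweep that jumps to successive judge-completion times until n people are counted; no midpoint, no interval, no search.
-- outside the precondition, e.g. on solution(-2, [-3]): A returns 1, B returns 0; on solution(-1, [-2, 0]): A raises ZeroDivisionError, B returns 0
import Mathlib
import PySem

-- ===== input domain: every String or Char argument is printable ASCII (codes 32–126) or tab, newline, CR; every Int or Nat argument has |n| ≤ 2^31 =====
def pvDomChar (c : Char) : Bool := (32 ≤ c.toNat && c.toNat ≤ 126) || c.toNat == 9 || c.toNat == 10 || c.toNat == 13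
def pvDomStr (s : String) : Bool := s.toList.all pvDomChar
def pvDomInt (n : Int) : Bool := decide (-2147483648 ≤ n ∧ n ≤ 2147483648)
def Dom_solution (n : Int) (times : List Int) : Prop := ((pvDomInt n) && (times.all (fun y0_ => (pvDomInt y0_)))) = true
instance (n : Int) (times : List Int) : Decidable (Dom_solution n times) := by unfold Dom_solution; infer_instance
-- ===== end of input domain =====

-- B replaces A's interval bisection by a closed-form rational lower bound (largest T with
-- sum(T/t) < n over the common denominator prod(times)) followed by an event sweep to the
-- next judge-completion times until n people are counted (alternative decomposition; no search).


-- ===== PORT A =====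
-- the inner 'for t in times: result += mid // t' loop
def pvCountA (times : List Int) (mid : Int) : Int :=
  times.foldl (fun result t => result + PySem.Int.floordiv mid t) 0

-- A's 'while start <= end' binary-search loop over (answer, start, end)
def pvBsLoop (n : Int) (times : List Int) (answer start e : Int) : Int :=
  if h : start ≤ e then
    let mid := PySem.Int.floordiv (start + e) 2
    if n ≤ pvCountA times mid then
      pvBsLoop n times mid start (mid - 1)
    else
      pvBsLoop n times answer (mid + 1) e
  else answer
termination_by (e + 1 - start).toNat
decreasing_by
  · have h2 := PySem.Int.floordiv_two_mid_bounds h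
    omega
  · have h2 := PySem.Int.floordiv_two_mid_bounds h
    omega

def solution (n : Int) (times : List Int) : Int :=
  match PySem.List.min? times (fun t => t) with
  | none => 0   -- unreachable under Pre_solution: Python's min([]) raises ValueError
  | some m => pvBsLoop n times 0 1 (m * n)

-- ===== PORT B =====
-- 'sum(cur // t for t in times)'
def pvCountB (times : List Int) (T : Int) : Int :=
  (times.map (fun t => PySem.Int.floordiv T t)).sum

-- 'min(t * (cur // t + 1) for t in times)'; the .getD default only makes the function total
-- (times = [] is unreachable from solution_alt: min(times) already raised there)
def pvNextEvent (times : List Int) (cur : Int) : Int :=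
  (PySem.List.min? (times.map fun t => t * (PySem.Int.floordiv cur t + 1)) (fun x => x)).getD (cur + 1)

-- 'while c < n: cur = <next event>; c = sum(cur // t ...)'; the inner 'c < c'' test is a
-- totality guard only: at an event the count strictly grows (proved in pvNextEvent_succ)
def pvWalk (n : Int) (times : List Int) (cur c : Int) : Int :=
  if _h : c < n then
    if _h2 : c < pvCountB times (pvNextEvent times cur) then
      pvWalk n times (pvNextEvent times cur) (pvCountB times (pvNextEvent times cur))
    else pvNextEvent times cur
  else cur
termination_by (n - c).toNat
decreasing_by omega

def solution_alt (n : Int) (times : List Int) : Int :=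
  match PySem.List.min? times (fun t => t) with
  | none => 0   -- unreachable under Pre_solution: Python's min([]) raises ValueError
  | some m =>
    if n < 1 ∨ m < 1 then 0
    else
      let den := times.foldl (· * ·) 1
      let num := (times.map (fun t => PySem.Int.floordiv den t)).sum
      let cur := PySem.Int.floordiv (n * den - 1) num
      pvWalk n times cur (pvCountB times cur)

-- ===== PRECONDITION & SPEC =====
-- Pre_ excludes the empty list (A's min raises ValueError) and the corner n < 0 with a
-- negative entry, which is outside the task's natural domain (negative people, negative
-- processing time): there A bisects a non-monotone predicate, so its value is an accident of
-- the bisection path (and with 0 also in the list it raises ZeroDivisionError).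
def Pre_solution (n : Int) (times : List Int) : Prop :=
  times ≠ [] ∧ (0 ≤ n ∨ ∀ t ∈ times, 0 ≤ t)
instance (n : Int) (times : List Int) : Decidable (Pre_solution n times) := by
  unfold Pre_solution; infer_instance

def pvWitness_solution : Int × List Int := (6, [7, 10])

def Spec_solution (n : Int) (times : List Int) (out : Int) : Prop := out = solution_alt n times
instance (n : Int) (times : List Int) (out : Int) : Decidable (Spec_solution n times out) := by
  unfold Spec_solution; infer_instance

-- ===== CLAIM (what is proved, stated in full; the proofs are below) =====
def Claim_equal_solution : Prop := ∀ (n : Int) (times : List Int), Dom_solution n times → Pre_solution n times → Spec_solution n times (solution n times)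

-- ===== LEMMAS AND PROOFS =====

-- the two throughput counters compute the same sum
theorem pvCount_eq (times : List Int) (T : Int) : pvCountA times T = pvCountB times T := by
  unfold pvCountA pvCountB
  simpa using PySem.List.foldl_add times (fun t => PySem.Int.floordiv T t) 0

theorem pvCountB_mono (times : List Int) (hpos : ∀ t ∈ times, 1 ≤ t) {T T' : Int}
    (hTT : T ≤ T') : pvCountB times T ≤ pvCountB times T' := by
  unfold pvCountB
  apply List.sum_le_sum
  intro t ht
  have ht1 := hpos t ht
  rw [PySem.Int.floordiv_eq_ediv_of_pos (by omega), PySem.Int.floordiv_eq_ediv_of_pos (by omega)]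
  exact Int.ediv_le_ediv (by omega) hTT

theorem pvCountB_zero (times : List Int) (hpos : ∀ t ∈ times, 1 ≤ t) :
    pvCountB times 0 = 0 := by
  unfold pvCountB
  have hmap : times.map (fun t => PySem.Int.floordiv 0 t) = times.map (fun _ => (0 : Int)) := by
    apply List.map_congr_left
    intro t ht
    rw [PySem.Int.floordiv_eq_ediv_of_pos (by have := hpos t ht; omega)]
    simp
  rw [hmap]
  simp

theorem pvCountB_full (times : List Int) (hpos : ∀ t ∈ times, 1 ≤ t) {m n : Int}
    (hm : m ∈ times) (hm1 : 1 ≤ m) (hn : 1 ≤ n) : n ≤ pvCountB times (m * n) := by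
  obtain ⟨l1, l2, rfl⟩ := List.append_of_mem hm
  have hmn : (0 : Int) ≤ m * n := mul_nonneg (by omega) (by omega)
  have hterm : ∀ t : Int, t ∈ l1 ++ m :: l2 → 0 ≤ PySem.Int.floordiv (m * n) t := by
    intro t ht
    have ht1 := hpos t ht
    rw [PySem.Int.floordiv_eq_ediv_of_pos (by omega)]
    exact Int.ediv_nonneg hmn (by omega)
  have hdivm : PySem.Int.floordiv (m * n) m = n := by
    rw [PySem.Int.floordiv_eq_ediv_of_pos (by omega)]
    exact Int.mul_ediv_cancel_left n (by omega)
  unfold pvCountB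
  rw [List.map_append, List.sum_append, List.map_cons, List.sum_cons, hdivm]
  have h1 : 0 ≤ (l1.map (fun t => PySem.Int.floordiv (m * n) t)).sum := by
    apply List.sum_nonneg
    intro x hx
    obtain ⟨t, ht, rfl⟩ := List.mem_map.mp hx
    exact hterm t (by simp [ht])
  have h2 : 0 ≤ (l2.map (fun t => PySem.Int.floordiv (m * n) t)).sum := by
    apply List.sum_nonneg
    intro x hx
    obtain ⟨t, ht, rfl⟩ := List.mem_map.mp hx
    exact hterm t (by simp [ht])
  linarith

-- A's loop returns its accumulator when nothing in [s, e] has enough throughput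
theorem pvBsLoop_none (n : Int) (times : List Int) (a s e : Int)
    (h : ∀ T, s ≤ T → T ≤ e → pvCountA times T < n) : pvBsLoop n times a s e = a := by
  induction a, s, e using pvBsLoop.induct n times with
  | case1 a s e hse mid hP ih =>
    have hmideq : mid = PySem.Int.floordiv (s + e) 2 := rfl
    rw [hmideq] at hP
    have hmid := PySem.Int.floordiv_two_mid_bounds hse
    exact absurd hP (by have := h _ hmid.1 hmid.2; omega)
  | case2 a s e hse mid hP ih =>
    have hmideq : mid = PySem.Int.floordiv (s + e) 2 := rfl
    rw [hmideq] at hP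
    rw [pvBsLoop, dif_pos hse, if_neg hP]
    exact ih (fun T h1 h2 => h T (by have := PySem.Int.floordiv_two_mid_bounds hse; omega) h2)
  | case3 a s e hse =>
    rw [pvBsLoop, dif_neg hse]

-- A's loop finds the least time L in [s, e] whose throughput reaches n
theorem pvBsLoop_least (n : Int) (times : List Int) (hpos : ∀ t ∈ times, 1 ≤ t)
    (a s e : Int) : ∀ L : Int, s ≤ L → L ≤ e → n ≤ pvCountA times L →
    (∀ T, s ≤ T → T < L → pvCountA times T < n) → pvBsLoop n times a s e = L := by
  induction a, s, e using pvBsLoop.induct n times with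
  | case1 a s e hse mid hP ih =>
    intro L hsL hLe hPL hmin
    have hmideq : mid = PySem.Int.floordiv (s + e) 2 := rfl
    rw [hmideq] at hP ih
    have hmid := PySem.Int.floordiv_two_mid_bounds hse
    have hLmid : L ≤ PySem.Int.floordiv (s + e) 2 := by
      by_contra hc
      have := hmin _ hmid.1 (by omega)
      omega
    rw [pvBsLoop, dif_pos hse, if_pos hP]
    rcases lt_or_ge L (PySem.Int.floordiv (s + e) 2) with hcase | hcase
    · exact ih L hsL (by omega) hPL hmin
    · have hLm : L = PySem.Int.floordiv (s + e) 2 := by omega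
      rw [← hLm]
      exact pvBsLoop_none n times L s (L - 1) (fun T h1 h2 => hmin T h1 (by omega))
  | case2 a s e hse mid hP ih =>
    intro L hsL hLe hPL hmin
    have hmideq : mid = PySem.Int.floordiv (s + e) 2 := rfl
    rw [hmideq] at hP ih
    have hmid := PySem.Int.floordiv_two_mid_bounds hse
    have hmidL : PySem.Int.floordiv (s + e) 2 < L := by
      by_contra hc
      have hmono : pvCountA times L ≤ pvCountA times (PySem.Int.floordiv (s + e) 2) := by
        rw [pvCount_eq, pvCount_eq]
        exact pvCountB_mono times hpos (by omega)
      omega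
    rw [pvBsLoop, dif_pos hse, if_neg hP]
    exact ih L (by omega) hLe hPL (fun T h1 h2 => hmin T (by omega) h2)
  | case3 a s e hse =>
    intro L hsL hLe hPL hmin
    omega

-- below the next event the count does not exceed the count at cur
theorem pvNextEvent_le (times : List Int) (cur T : Int) (hpos : ∀ t ∈ times, 1 ≤ t)
    (hT : T < pvNextEvent times cur) : pvCountB times T ≤ pvCountB times cur := by
  unfold pvNextEvent at hT
  cases hmin : PySem.List.min? (times.map fun t => t * (PySem.Int.floordiv cur t + 1)) (fun x => x) with
  | none =>
    have : times = [] := by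
      have := (PySem.List.min?_eq_none_iff (times.map fun t => t * (PySem.Int.floordiv cur t + 1)) (fun x => x)).mp hmin
      simpa using this
    subst this
    simp [pvCountB]
  | some e =>
    rw [hmin] at hT
    simp only [Option.getD_some] at hT
    unfold pvCountB
    apply List.sum_le_sum
    intro t ht
    have ht1 := hpos t ht
    have hle : e ≤ t * (PySem.Int.floordiv cur t + 1) :=
      PySem.List.min?_isMin hmin _ (List.mem_map.mpr ⟨t, ht, rfl⟩)
    have hTlt : T < (PySem.Int.floordiv cur t + 1) * t := by
      rw [mul_comm]; omega
    have := (PySem.Int.floordiv_lt_iff_lt_mul (a := T) (b := t)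
      (q := PySem.Int.floordiv cur t + 1) (by omega)).mpr hTlt
    omega

-- at the next event the count strictly increases
theorem pvNextEvent_succ (times : List Int) (cur : Int) (hne : times ≠ [])
    (hpos : ∀ t ∈ times, 1 ≤ t) :
    pvCountB times cur + 1 ≤ pvCountB times (pvNextEvent times cur) := by
  unfold pvNextEvent
  cases hmin : PySem.List.min? (times.map fun t => t * (PySem.Int.floordiv cur t + 1)) (fun x => x) with
  | none =>
    exact absurd (by simpa using (PySem.List.min?_eq_none_iff _ _).mp hmin) hne
  | some e =>
    simp only [Option.getD_some]
    have hmem := PySem.List.min?_mem hmin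
    obtain ⟨t0, ht0m, he⟩ := List.mem_map.mp hmem
    have hgt : cur < e := by
      have ht01 := hpos t0 ht0m
      have := (PySem.Int.floordiv_lt_iff_lt_mul (a := cur) (b := t0)
        (q := PySem.Int.floordiv cur t0 + 1) (by omega)).mp (by omega)
      linarith
    obtain ⟨l1, l2, rfl⟩ := List.append_of_mem ht0m
    have hsplit : ∀ T : Int, pvCountB (l1 ++ t0 :: l2) T =
        (l1.map (fun t => PySem.Int.floordiv T t)).sum + PySem.Int.floordiv T t0 +
        (l2.map (fun t => PySem.Int.floordiv T t)).sum := by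
      intro T
      unfold pvCountB
      rw [List.map_append, List.sum_append, List.map_cons, List.sum_cons]
      ring
    rw [hsplit, hsplit]
    have ht01 := hpos t0 (by simp)
    -- the minimizing judge advances by exactly one person
    have hdiv0 : PySem.Int.floordiv e t0 = PySem.Int.floordiv cur t0 + 1 := by
      rw [← he]
      rw [PySem.Int.floordiv_eq_ediv_of_pos (by omega)]
      exact Int.mul_ediv_cancel_left _ (by omega)
    have hmono1 : (l1.map (fun t => PySem.Int.floordiv cur t)).sum ≤
        (l1.map (fun t => PySem.Int.floordiv e t)).sum := by
      apply List.sum_le_sum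
      intro t ht
      have ht1 := hpos t (by simp [ht])
      rw [PySem.Int.floordiv_eq_ediv_of_pos (by omega), PySem.Int.floordiv_eq_ediv_of_pos (by omega)]
      exact Int.ediv_le_ediv (by omega) (by omega)
    have hmono2 : (l2.map (fun t => PySem.Int.floordiv cur t)).sum ≤
        (l2.map (fun t => PySem.Int.floordiv e t)).sum := by
      apply List.sum_le_sum
      intro t ht
      have ht1 := hpos t (by simp [ht])
      rw [PySem.Int.floordiv_eq_ediv_of_pos (by omega), PySem.Int.floordiv_eq_ediv_of_pos (by omega)]
      exact Int.ediv_le_ediv (by omega) (by omega)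
    omega

-- the closed-form start value undershoots: its count is below n
theorem pvStart_lt (n : Int) (times : List Int) (hne : times ≠ [])
    (hpos : ∀ t ∈ times, 1 ≤ t) (_hn : 1 ≤ n) :
    pvCountB times (PySem.Int.floordiv (n * (times.foldl (· * ·) 1) - 1)
      ((times.map (fun t => PySem.Int.floordiv (times.foldl (· * ·) 1) t)).sum)) < n := by
  have hfold : times.foldl (· * ·) 1 = times.prod := List.prod_eq_foldl.symm
  set den := times.foldl (· * ·) 1 with hden
  have hdenpos : 0 < den := by
    rw [hfold]
    exact List.prod_pos (fun t ht => by have := hpos t ht; omega)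
  have hdvd : ∀ t ∈ times, t ∣ den := by
    intro t ht
    rw [hfold]
    exact List.dvd_prod ht
  set num := (times.map (fun t => PySem.Int.floordiv den t)).sum with hnum
  have hterm1 : ∀ t ∈ times, 1 ≤ PySem.Int.floordiv den t := by
    intro t ht
    have ht1 := hpos t ht
    have htd : t ≤ den := Int.le_of_dvd hdenpos (hdvd t ht)
    exact (PySem.Int.le_floordiv_iff_mul_le (by omega)).mpr (by omega)
  have hnum1 : 1 ≤ num := by
    obtain ⟨t0, l2, rfl⟩ := List.exists_cons_of_ne_nil hne
    rw [hnum, List.map_cons, List.sum_cons]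
    have h1 := hterm1 t0 (by simp)
    have h2 : 0 ≤ (l2.map (fun t => PySem.Int.floordiv den t)).sum := by
      apply List.sum_nonneg
      intro x hx
      obtain ⟨t, ht, rfl⟩ := List.mem_map.mp hx
      have := hterm1 t (by simp [ht])
      omega
    omega
  set L := PySem.Int.floordiv (n * den - 1) num with hL
  -- count(L) * den ≤ L * num, termwise through the exact division den = t * (den // t)
  have hkey : pvCountB times L * den ≤ L * num := by
    unfold pvCountB
    rw [hnum, ← List.sum_map_mul_right, ← List.sum_map_mul_left]
    apply List.sum_le_sum
    intro t ht
    have ht1 := hpos t ht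
    have hdt : den = t * PySem.Int.floordiv den t := by
      obtain ⟨c, hc⟩ := hdvd t ht
      rw [hc, PySem.Int.floordiv_eq_ediv_of_pos (by omega), Int.mul_ediv_cancel_left _ (by omega)]
    have hfl : PySem.Int.floordiv L t * t ≤ L :=
      (PySem.Int.le_floordiv_iff_mul_le (by omega)).mp (le_refl _)
    have heq : PySem.Int.floordiv L t * den =
        PySem.Int.floordiv L t * t * PySem.Int.floordiv den t := by
      nth_rewrite 1 [hdt]; ring
    rw [heq]
    exact mul_le_mul_of_nonneg_right hfl (by have := hterm1 t ht; omega)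
  have hLnum : L * num ≤ n * den - 1 := by
    exact (PySem.Int.le_floordiv_iff_mul_le (b := num) (by omega)).mp (le_of_eq hL)
  have : pvCountB times L * den < n * den := by omega
  exact lt_of_mul_lt_mul_right this (by omega)

-- the sweep returns the least time whose count reaches n
theorem pvWalk_spec (n : Int) (times : List Int) (hne : times ≠ [])
    (hpos : ∀ t ∈ times, 1 ≤ t) :
    ∀ cur c, c = pvCountB times cur → (∀ T, T < cur → pvCountB times T < n) →
      n ≤ pvCountB times (pvWalk n times cur c) ∧
      ∀ T, T < pvWalk n times cur c → pvCountB times T < n := by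
  intro cur c
  induction cur, c using pvWalk.induct n times with
  | case1 cur c hlt hcc ih =>
    intro hc hbelow
    rw [pvWalk, dif_pos hlt, dif_pos hcc]
    exact ih rfl (fun T hT => by
      have := pvNextEvent_le times cur T hpos hT
      omega)
  | case2 cur c hlt hcc =>
    intro hc hbelow
    exfalso
    have := pvNextEvent_succ times cur hne hpos
    omega
  | case3 cur c hlt =>
    intro hc hbelow
    rw [pvWalk, dif_neg hlt]
    exact ⟨by omega, hbelow⟩

-- ===== VERDICT (by name: the statement is the Claim_ definition above) =====
theorem solution_spec : Claim_equal_solution := by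
  unfold Claim_equal_solution
  intro n times hdom hpre
  obtain ⟨hne, hpre2⟩ := hpre
  unfold Spec_solution solution solution_alt
  cases hmin : PySem.List.min? times (fun t => t) with
  | none => exact absurd ((PySem.List.min?_eq_none_iff times _).mp hmin) hne
  | some m =>
    simp only []
    have hm_mem : m ∈ times := PySem.List.min?_mem hmin
    by_cases hg : n < 1 ∨ m < 1
    · rw [if_pos hg]
      -- the search interval [1, m*n] is empty: A's loop never runs
      have hmn : m * n < 1 := by
        rcases hg with hn0 | hm0
        · rcases hpre2 with hn' | hall
          · have : n = 0 := by omega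
            simp [this]
          · have hm0' : 0 ≤ m := hall m hm_mem
            have : m * n ≤ 0 := mul_nonpos_of_nonneg_of_nonpos (by omega) (by omega)
            omega
        · by_cases hn' : 0 ≤ n
          · have : m * n ≤ 0 := by
              rcases lt_or_ge m 0 with h | h
              · exact mul_nonpos_of_nonpos_of_nonneg (by omega) hn'
              · have : m = 0 := by omega
                simp [this]
            omega
          · rcases hpre2 with h | hall
            · omega
            · have h0 := hall m hm_mem
              have : m * n ≤ 0 := mul_nonpos_of_nonneg_of_nonpos (by omega) (by omega)
              omega
      rw [pvBsLoop, dif_neg (by omega)]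
    · rw [if_neg hg]
      have hn1 : 1 ≤ n := by omega
      have hm1 : 1 ≤ m := by omega
      have hpos : ∀ t ∈ times, 1 ≤ t := fun t ht =>
        le_trans hm1 (PySem.List.min?_isMin hmin t ht)
      set den := times.foldl (· * ·) 1 with hden
      set num := (times.map (fun t => PySem.Int.floordiv den t)).sum with hnum
      set L := PySem.Int.floordiv (n * den - 1) num with hL
      have hstart : pvCountB times L < n := pvStart_lt n times hne hpos hn1
      obtain ⟨hR1, hR2⟩ := pvWalk_spec n times hne hpos L (pvCountB times L) rfl
        (fun T hT => by
          have := pvCountB_mono times hpos (le_of_lt hT)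
          omega)
      set R := pvWalk n times L (pvCountB times L) with hRdef
      have hRpos : 1 ≤ R := by
        by_contra hc
        have h0 : pvCountB times R ≤ pvCountB times 0 := pvCountB_mono times hpos (by omega)
        rw [pvCountB_zero times hpos] at h0
        omega
      have hRle : R ≤ m * n := by
        by_contra hc
        have := hR2 (m * n) (by omega)
        have := pvCountB_full times hpos hm_mem hm1 hn1
        omega
      exact pvBsLoop_least n times hpos 0 1 (m * n) R hRpos hRle
        (by rw [pvCount_eq]; exact hR1)
        (fun T hT1 hT2 => by rw [pvCount_eq]; exact hR2 T hT2)
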